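-- pv_equiv track=rewrite | github.com/jthorvaldur/words_quantum_legal | src/morpheme_negation.py | _find_suffix
-- ===== SOURCE A (Python) =====
-- SUFFIXES: dict[str, str] = {
--     "tion":  "contract/action/process",
--     "sion":  "contract/action/process",
--     "ion":   "contract/action",
--     "ment":  "mind/state/result of action",
--     "ence":  "now-state/quality",
--     "ance":  "now-state/quality",
--     "ency":  "now-state/quality",
--     "ancy":  "now-state/quality",
--     "ity":   "quality/state",
--     "ty":    "quality/state",
--     "ness":  "state/condition",
--     "ous":   "full of/having quality",
--     "ious":  "full of/having quality",
--     "eous":  "full of/having quality",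
--     "ive":   "tending to/having nature of",
--     "ative": "tending to/relating to",
--     "itive": "tending to/relating to",
--     "able":  "capable of/worthy of",
--     "ible":  "capable of/worthy of",
--     "al":    "pertaining to/of the kind",
--     "ial":   "pertaining to/of the kind",
--     "ual":   "pertaining to/of the kind",
--     "ing":   "now-time/living/present action",
--     "ed":    "past/dead time/completed",
--     "er":    "one who/that which",
--     "or":    "one who/that which",
--     "ar":    "one who/relating to",
--     "ist":   "one who practices",
--     "ant":   "one who/performing",
--     "ent":   "one who/performing",
--     "ate":   "to make/through/state",
--     "ize":   "to make/to become",
--     "ise":   "to make/to become",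
--     "fy":    "to make/to cause",
--     "ify":   "to make/to cause",
--     "en":    "to make/made of",
--     "ure":   "act/process/result",
--     "ture":  "act/process/result",
--     "age":   "act/state/collection",
--     "dom":   "domain/state/condition",
--     "ship":  "state/office/skill",
--     "hood":  "state/condition/group",
--     "ward":  "direction/toward",
--     "wise":  "manner/direction",
--     "ly":    "in the manner of",
--     "ful":   "full of",
--     "less":  "without",
--     "ment":  "mind/state/result of action",
--     "ic":    "pertaining to/having nature of",
--     "ical":  "pertaining to/having nature of",
--     "ous":   "full of/characterized by",
--     "ory":   "place of/serving for",
--     "ary":   "relating to/place of",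
--     "ery":   "place of/art of/collection",
-- }
--
-- def _find_suffix(word: str) -> tuple[str, str, str]:
--     """
--     Attempt to identify a suffix in the word.
--     Returns (stem, suffix, suffix_meaning).
--     Checks longer suffixes first.
--     """
--     word_lower = word.lower()
--
--     # Sort suffixes by length (longest first) to find best match
--     sorted_suffixes = sorted(SUFFIXES.keys(), key=len, reverse=True)
--
--     for suffix in sorted_suffixes:
--         if word_lower.endswith(suffix) and len(word_lower) > len(suffix) + 1:
--             stem = word_lower[:-len(suffix)]
--             return (stem, suffix, SUFFIXES[suffix])
--
--     return (word_lower, "", "")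
-- ===== SOURCE B (Python) =====
-- # Suffix table organized by suffix length (longest first); values are the
-- # final meanings of the module's SUFFIXES dict (later duplicates win).
-- _SUFFIXES_BY_LEN: list[tuple[int, dict[str, str]]] = [
--     (5, {
--         'ative': 'tending to/relating to',
--         'itive': 'tending to/relating to',
--     }),
--     (4, {
--         'tion': 'contract/action/process',
--         'sion': 'contract/action/process',
--         'ment': 'mind/state/result of action',
--         'ence': 'now-state/quality',
--         'ance': 'now-state/quality',
--         'ency': 'now-state/quality',
--         'ancy': 'now-state/quality',
--         'ness': 'state/condition',
--         'ious': 'full of/having quality',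
--         'eous': 'full of/having quality',
--         'able': 'capable of/worthy of',
--         'ible': 'capable of/worthy of',
--         'ture': 'act/process/result',
--         'ship': 'state/office/skill',
--         'hood': 'state/condition/group',
--         'ward': 'direction/toward',
--         'wise': 'manner/direction',
--         'less': 'without',
--         'ical': 'pertaining to/having nature of',
--     }),
--     (3, {
--         'ion': 'contract/action',
--         'ity': 'quality/state',
--         'ous': 'full of/characterized by',
--         'ive': 'tending to/having nature of',
--         'ial': 'pertaining to/of the kind',
--         'ual': 'pertaining to/of the kind',
--         'ing': 'now-time/living/present action',
--         'ist': 'one who practices',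
--         'ant': 'one who/performing',
--         'ent': 'one who/performing',
--         'ate': 'to make/through/state',
--         'ize': 'to make/to become',
--         'ise': 'to make/to become',
--         'ify': 'to make/to cause',
--         'ure': 'act/process/result',
--         'age': 'act/state/collection',
--         'dom': 'domain/state/condition',
--         'ful': 'full of',
--         'ory': 'place of/serving for',
--         'ary': 'relating to/place of',
--         'ery': 'place of/art of/collection',
--     }),
--     (2, {
--         'ty': 'quality/state',
--         'al': 'pertaining to/of the kind',
--         'ed': 'past/dead time/completed',
--         'er': 'one who/that which',
--         'or': 'one who/that which',
--         'ar': 'one who/relating to',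
--         'fy': 'to make/to cause',
--         'en': 'to make/made of',
--         'ly': 'in the manner of',
--         'ic': 'pertaining to/having nature of',
--     }),
-- ]
--
-- def _find_suffix(word: str) -> tuple[str, str, str]:
--     """
--     Attempt to identify a suffix in the word.
--     Returns (stem, suffix, suffix_meaning).
--     Tries each suffix length, longest first, with one direct dict lookup.
--     """
--     wl = word.lower()
--     for length, table in _SUFFIXES_BY_LEN:
--         if len(wl) > length + 1:
--             suffix = wl[-length:]
--             meaning = table.get(suffix)
--             if meaning is not None:
--                 return (wl[:-length], suffix, meaning)
--     return (wl, "", "")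
-- ===== Notes on version B (the rewrite author's own statement) =====
-- stated objective: alternative
-- what changed: Instead of sorting all 53 suffix keys by length on every call and scanning them with endswith, B keeps the table pre-grouped into per-length dicts and, for each of the 4 lengths longest-first, does one direct dict lookup of the word's length-L tail.
import Mathlib
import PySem

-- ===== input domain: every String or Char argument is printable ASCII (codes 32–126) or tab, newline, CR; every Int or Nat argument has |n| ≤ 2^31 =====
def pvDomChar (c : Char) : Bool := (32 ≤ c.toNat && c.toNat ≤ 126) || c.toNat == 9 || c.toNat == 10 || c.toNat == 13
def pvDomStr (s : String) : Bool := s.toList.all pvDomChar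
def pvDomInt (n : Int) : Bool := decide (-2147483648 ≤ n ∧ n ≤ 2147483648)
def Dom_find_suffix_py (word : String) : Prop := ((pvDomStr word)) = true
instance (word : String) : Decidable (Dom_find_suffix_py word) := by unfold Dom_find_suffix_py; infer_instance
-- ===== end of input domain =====

-- ===== PORT A =====
-- B keeps the suffix table pre-grouped into per-length dicts and replaces A's per-call
-- sort of all 53 keys plus endswith scan by 4 direct tail lookups, longest length first
-- (objective: alternative; per-call work drops, but too small to time).

-- the SUFFIXES dict literal of the module (duplicate keys overwrite in place, like Python)
def suffixEntries : List (String × String) := [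
  ("tion", "contract/action/process"),
  ("sion", "contract/action/process"),
  ("ion", "contract/action"),
  ("ment", "mind/state/result of action"),
  ("ence", "now-state/quality"),
  ("ance", "now-state/quality"),
  ("ency", "now-state/quality"),
  ("ancy", "now-state/quality"),
  ("ity", "quality/state"),
  ("ty", "quality/state"),
  ("ness", "state/condition"),
  ("ous", "full of/having quality"),
  ("ious", "full of/having quality"),
  ("eous", "full of/having quality"),
  ("ive", "tending to/having nature of"),
  ("ative", "tending to/relating to"),
  ("itive", "tending to/relating to"),
  ("able", "capable of/worthy of"),
  ("ible", "capable of/worthy of"),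
  ("al", "pertaining to/of the kind"),
  ("ial", "pertaining to/of the kind"),
  ("ual", "pertaining to/of the kind"),
  ("ing", "now-time/living/present action"),
  ("ed", "past/dead time/completed"),
  ("er", "one who/that which"),
  ("or", "one who/that which"),
  ("ar", "one who/relating to"),
  ("ist", "one who practices"),
  ("ant", "one who/performing"),
  ("ent", "one who/performing"),
  ("ate", "to make/through/state"),
  ("ize", "to make/to become"),
  ("ise", "to make/to become"),
  ("fy", "to make/to cause"),
  ("ify", "to make/to cause"),
  ("en", "to make/made of"),
  ("ure", "act/process/result"),
  ("ture", "act/process/result"),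
  ("age", "act/state/collection"),
  ("dom", "domain/state/condition"),
  ("ship", "state/office/skill"),
  ("hood", "state/condition/group"),
  ("ward", "direction/toward"),
  ("wise", "manner/direction"),
  ("ly", "in the manner of"),
  ("ful", "full of"),
  ("less", "without"),
  ("ment", "mind/state/result of action"),
  ("ic", "pertaining to/having nature of"),
  ("ical", "pertaining to/having nature of"),
  ("ous", "full of/characterized by"),
  ("ory", "place of/serving for"),
  ("ary", "relating to/place of"),
  ("ery", "place of/art of/collection")]

def SUFFIXES : PySem.Dict String String := PySem.Dict.ofList suffixEntries

-- 'for suffix in sorted_suffixes: if ...: return ...' ; SUFFIXES[suffix] is ported as getD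
-- (the scanned key always comes from SUFFIXES.keys, so the lookup cannot miss)
def findLoop (wl : String) : List String → String × String × String
  | [] => (wl, "", "")
  | s :: rest =>
    if PySem.Str.endswith wl s = true ∧ PySem.Str.len s + 1 < PySem.Str.len wl then
      (PySem.Str.slice wl none (some (-(PySem.Str.len s : Int))), s, SUFFIXES.getD s "")
    else findLoop wl rest

def find_suffix_py (word : String) : String × String × String :=
  let wl := PySem.Str.lower word
  findLoop wl (PySem.List.sorted SUFFIXES.keys (fun s => PySem.Str.len s) true)

-- ===== PORT B =====
-- _SUFFIXES_BY_LEN: the same table, pre-grouped into one dict per suffix length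
def sfx5 : PySem.Dict String String := PySem.Dict.ofList [
  ("ative", "tending to/relating to"),
  ("itive", "tending to/relating to")
]

def sfx4 : PySem.Dict String String := PySem.Dict.ofList [
  ("tion", "contract/action/process"),
  ("sion", "contract/action/process"),
  ("ment", "mind/state/result of action"),
  ("ence", "now-state/quality"),
  ("ance", "now-state/quality"),
  ("ency", "now-state/quality"),
  ("ancy", "now-state/quality"),
  ("ness", "state/condition"),
  ("ious", "full of/having quality"),
  ("eous", "full of/having quality"),
  ("able", "capable of/worthy of"),
  ("ible", "capable of/worthy of"),
  ("ture", "act/process/result"),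
  ("ship", "state/office/skill"),
  ("hood", "state/condition/group"),
  ("ward", "direction/toward"),
  ("wise", "manner/direction"),
  ("less", "without"),
  ("ical", "pertaining to/having nature of")
]

def sfx3 : PySem.Dict String String := PySem.Dict.ofList [
  ("ion", "contract/action"),
  ("ity", "quality/state"),
  ("ous", "full of/characterized by"),
  ("ive", "tending to/having nature of"),
  ("ial", "pertaining to/of the kind"),
  ("ual", "pertaining to/of the kind"),
  ("ing", "now-time/living/present action"),
  ("ist", "one who practices"),
  ("ant", "one who/performing"),
  ("ent", "one who/performing"),
  ("ate", "to make/through/state"),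
  ("ize", "to make/to become"),
  ("ise", "to make/to become"),
  ("ify", "to make/to cause"),
  ("ure", "act/process/result"),
  ("age", "act/state/collection"),
  ("dom", "domain/state/condition"),
  ("ful", "full of"),
  ("ory", "place of/serving for"),
  ("ary", "relating to/place of"),
  ("ery", "place of/art of/collection")
]

def sfx2 : PySem.Dict String String := PySem.Dict.ofList [
  ("ty", "quality/state"),
  ("al", "pertaining to/of the kind"),
  ("ed", "past/dead time/completed"),
  ("er", "one who/that which"),
  ("or", "one who/that which"),
  ("ar", "one who/relating to"),
  ("fy", "to make/to cause"),
  ("en", "to make/made of"),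
  ("ly", "in the manner of"),
  ("ic", "pertaining to/having nature of")
]

def byLen : List (Int × PySem.Dict String String) := [(5, sfx5), (4, sfx4), (3, sfx3), (2, sfx2)]

-- 'for length, table in _SUFFIXES_BY_LEN: ...'
def altLoop (wl : String) : List (Int × PySem.Dict String String) → String × String × String
  | [] => (wl, "", "")
  | (L, tbl) :: rest =>
    if L + 1 < PySem.Str.len wl then
      match tbl.get? (PySem.Str.slice wl (some (-L)) none) with
      | some meaning =>
          (PySem.Str.slice wl none (some (-L)), PySem.Str.slice wl (some (-L)) none, meaning)
      | none => altLoop wl rest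
    else altLoop wl rest

def find_suffix_py_alt (word : String) : String × String × String :=
  altLoop (PySem.Str.lower word) byLen

-- ===== PRECONDITION & SPEC =====
def Spec_find_suffix_py (word : String) (out : String × String × String) : Prop := out = find_suffix_py_alt word
instance (word : String) (out : String × String × String) : Decidable (Spec_find_suffix_py word out) := by unfold Spec_find_suffix_py; infer_instance

-- ===== CLAIM (what is proved, stated in full; the proofs are below) =====
def Claim_equal_find_suffix_py : Prop := ∀ (word : String), Dom_find_suffix_py word → Spec_find_suffix_py word (find_suffix_py word)

-- ===== LEMMAS AND PROOFS =====

set_option maxRecDepth 40000 in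
lemma sorted_keys_eq :
    PySem.List.sorted SUFFIXES.keys (fun s => PySem.Str.len s) true
      = sfx5.keys ++ sfx4.keys ++ sfx3.keys ++ sfx2.keys := by
  decide

-- findLoop with an arbitrary fallback, to split the scan at the group boundaries
def scanG (wl : String) (r : String × String × String) : List String → String × String × String
  | [] => r
  | s :: rest =>
    if PySem.Str.endswith wl s = true ∧ PySem.Str.len s + 1 < PySem.Str.len wl then
      (PySem.Str.slice wl none (some (-(PySem.Str.len s))), s, SUFFIXES.getD s "")
    else scanG wl r rest

lemma findLoop_eq_scanG (wl : String) (ks : List String) :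
    findLoop wl ks = scanG wl (wl, "", "") ks := by
  induction ks with
  | nil => rfl
  | cons s rest ih => simp only [findLoop, scanG, ih]

lemma scanG_append (wl : String) (r : String × String × String) (ks1 ks2 : List String) :
    scanG wl r (ks1 ++ ks2) = scanG wl (scanG wl r ks2) ks1 := by
  induction ks1 with
  | nil => rfl
  | cons s rest ih => simp only [List.cons_append, scanG, ih]

lemma endswith_iff_slice (wl k : String) (L : Nat) (hL : 0 < L)
    (hk : PySem.Str.len k = (L : Int)) (_hw : (L : Int) ≤ PySem.Str.len wl) :
    (PySem.Str.endswith wl k = true ↔ PySem.Str.slice wl (some (-(L : Int))) none = k) := by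
  have hk' : k.length = L := by
    rw [PySem.Str.len_eq, String.length_toList] at hk; exact_mod_cast hk
  rw [PySem.Str.endswith_eq, PySem.Chars.endswith_iff, List.suffix_iff_eq_drop,
      ← String.toList_inj]
  simp [pysem, PySem.Str.slice, PySem.List.slice_from_neg_natCast _ _ hL, hk', eq_comm]

lemma len_slice_tail (wl : String) (L : Nat) (hL : 0 < L) (hw : (L : Int) ≤ PySem.Str.len wl) :
    PySem.Str.len (PySem.Str.slice wl (some (-(L : Int))) none) = (L : Int) := by
  rw [PySem.Str.len_eq, String.length_toList] at hw
  simp [pysem, PySem.Str.slice, PySem.List.slice_from_neg_natCast _ _ hL]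
  omega

lemma scanG_none (wl : String) (r : String × String × String) (ks : List String)
    (h : ∀ k ∈ ks, ¬ (PySem.Str.endswith wl k = true ∧ PySem.Str.len k + 1 < PySem.Str.len wl)) :
    scanG wl r ks = r := by
  induction ks with
  | nil => rfl
  | cons s rest ih =>
      rw [scanG, if_neg (h s (List.mem_cons_self ..))]
      exact ih (fun k hk => h k (List.mem_cons_of_mem _ hk))

lemma scanG_found (wl : String) (r : String × String × String) (t : String) (ks : List String)
    (ht : t ∈ ks)
    (hiff : ∀ k ∈ ks, (PySem.Str.endswith wl k = true ↔ k = t))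
    (hg : PySem.Str.len t + 1 < PySem.Str.len wl) :
    scanG wl r ks = (PySem.Str.slice wl none (some (-(PySem.Str.len t))), t, SUFFIXES.getD t "") := by
  induction ks with
  | nil => cases ht
  | cons s rest ih =>
      by_cases hs : s = t
      · subst hs
        rw [scanG, if_pos ⟨(hiff s (List.mem_cons_self ..)).mpr rfl, hg⟩]
      · have hns : ¬ PySem.Str.endswith wl s = true := fun h =>
          hs ((hiff s (List.mem_cons_self ..)).mp h)
        rw [scanG, if_neg (fun hc => hns hc.1)]
        have ht' : t ∈ rest := by
          cases List.mem_cons.mp ht with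
          | inl h => exact absurd h.symm hs
          | inr h => exact h
        exact ih ht' (fun k hk => hiff k (List.mem_cons_of_mem _ hk))

-- one length level of A's scan equals B's single lookup in the per-length dict
lemma level (L : Nat) (hL : 0 < L) (d : PySem.Dict String String)
    (hmem : ∀ k ∈ d.keys, k ∈ SUFFIXES.keys ∧ PySem.Str.len k = (L : Int))
    (hagree : ∀ k ∈ d.keys, SUFFIXES.getD k "" = d.getD k "")
    (wl : String) (r : String × String × String) :
    scanG wl r d.keys =
      (if (L : Int) + 1 < PySem.Str.len wl then
        match d.get? (PySem.Str.slice wl (some (-(L : Int))) none) with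
        | some meaning =>
            (PySem.Str.slice wl none (some (-(L : Int))), PySem.Str.slice wl (some (-(L : Int))) none,
              meaning)
        | none => r
      else r) := by
  by_cases hg : (L : Int) + 1 < PySem.Str.len wl
  · rw [if_pos hg]
    have hw : (L : Int) ≤ PySem.Str.len wl := by omega
    set t := PySem.Str.slice wl (some (-(L : Int))) none with ht
    have hlt : PySem.Str.len t = (L : Int) := len_slice_tail wl L hL hw
    have hiff : ∀ k ∈ d.keys, (PySem.Str.endswith wl k = true ↔ k = t) := by
      intro k hk
      rw [endswith_iff_slice wl k L hL (hmem k hk).2 hw, ← ht, eq_comm]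
    cases hget : d.get? t with
    | some meaning =>
        have htk : t ∈ d.keys := by
          by_contra hnk
          rw [← PySem.Dict.get?_eq_none_iff_not_mem_keys] at hnk
          rw [hget] at hnk; cases hnk
        have hfound := scanG_found wl r t d.keys htk hiff (by omega)
        rw [hfound, hlt]
        have hm : SUFFIXES.getD t "" = meaning := by
          rw [hagree t htk, PySem.Dict.getD_eq_get?_getD, hget]; rfl
        rw [hm]
    | none =>
        have htk : t ∉ d.keys := (PySem.Dict.get?_eq_none_iff_not_mem_keys _ _).mp hget
        refine scanG_none wl r d.keys (fun k hk hc => ?_)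
        exact htk (((hiff k hk).mp hc.1) ▸ hk)
  · rw [if_neg hg]
    refine scanG_none wl r d.keys (fun k hk hc => ?_)
    rw [(hmem k hk).2] at hc
    exact hg hc.2

set_option maxRecDepth 40000 in
lemma sfx5_spec : (∀ k ∈ sfx5.keys, k ∈ SUFFIXES.keys ∧ PySem.Str.len k = (5 : Int))  ∧
    (∀ k ∈ sfx5.keys, SUFFIXES.getD k "" = sfx5.getD k "") := by decide
set_option maxRecDepth 40000 in
lemma sfx4_spec : (∀ k ∈ sfx4.keys, k ∈ SUFFIXES.keys ∧ PySem.Str.len k = (4 : Int))  ∧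
    (∀ k ∈ sfx4.keys, SUFFIXES.getD k "" = sfx4.getD k "") := by decide
set_option maxRecDepth 40000 in
lemma sfx3_spec : (∀ k ∈ sfx3.keys, k ∈ SUFFIXES.keys ∧ PySem.Str.len k = (3 : Int))  ∧
    (∀ k ∈ sfx3.keys, SUFFIXES.getD k "" = sfx3.getD k "") := by decide
set_option maxRecDepth 40000 in
lemma sfx2_spec : (∀ k ∈ sfx2.keys, k ∈ SUFFIXES.keys ∧ PySem.Str.len k = (2 : Int))  ∧
    (∀ k ∈ sfx2.keys, SUFFIXES.getD k "" = sfx2.getD k "") := by decide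

-- unfolding equations for altLoop
lemma altLoop_cons (wl : String) (L : Int) (tbl : PySem.Dict String String)
    (rest : List (Int × PySem.Dict String String)) :
    altLoop wl ((L, tbl) :: rest) =
      (if L + 1 < PySem.Str.len wl then
        match tbl.get? (PySem.Str.slice wl (some (-L)) none) with
        | some meaning =>
            (PySem.Str.slice wl none (some (-L)), PySem.Str.slice wl (some (-L)) none, meaning)
        | none => altLoop wl rest
      else altLoop wl rest) := rfl

lemma altLoop_nil (wl : String) : altLoop wl [] = (wl, "", "") := rfl

set_option maxRecDepth 1000000 in
lemma core_eq (wl : String) :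
    findLoop wl (PySem.List.sorted SUFFIXES.keys (fun s => PySem.Str.len s) true)
      = altLoop wl byLen := by
  rw [sorted_keys_eq, findLoop_eq_scanG,
      scanG_append, scanG_append, scanG_append,
      level 2 (by omega) sfx2 sfx2_spec.1 sfx2_spec.2,
      level 3 (by omega) sfx3 sfx3_spec.1 sfx3_spec.2,
      level 4 (by omega) sfx4 sfx4_spec.1 sfx4_spec.2,
      level 5 (by omega) sfx5 sfx5_spec.1 sfx5_spec.2]
  show _ = altLoop wl [(5, sfx5), (4, sfx4), (3, sfx3), (2, sfx2)]
  simp only [altLoop_cons, altLoop_nil]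
  push_cast
  rfl

-- ===== VERDICT (by name: the statement is the Claim_ definition above) =====
theorem find_suffix_py_spec : Claim_equal_find_suffix_py := by
  intro word _
  unfold Spec_find_suffix_py find_suffix_py find_suffix_py_alt
  exact core_eq (PySem.Str.lower word)
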